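-- pv_equiv track=rewrite | github.com/evan-greenbrg/mobility | mobility/puller_helpers.py | get_quarters
-- ===== SOURCE A (Python) =====
-- MONTHS = ['01', '02', '03', '04', '05', '06', '07', '08',
--           '09', '10', '11', '12', ]
--
-- def get_quarters(min_water):
--     quarters = []
--     quarter = []
--     for i, mo in enumerate(range(min_water, min_water + 12)):
--         if mo > 12:
--             mo -= 12
--
--         if (i + 1) % 3:
--             quarter.append(MONTHS[mo - 1])
--         else:
--             quarter.append(MONTHS[mo - 1])
--             quarters.append(quarter)
--             quarter = []
--
--     return quarters
-- ===== SOURCE B (Python) =====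
-- MONTHS = ['01', '02', '03', '04', '05', '06', '07', '08',
--           '09', '10', '11', '12', ]
--
-- def get_quarters(min_water):
--     months = []
--     for i in range(12):
--         mo = min_water + i
--         if mo > 12:
--             mo -= 12
--         months.append(MONTHS[mo - 1])
--     return [months[j:j + 3] for j in range(0, 12, 3)]
-- ===== Notes on version B (the rewrite author's own statement) =====
-- stated objective: simpler
-- what changed: Replaces the interleaved accumulate-and-emit loop (running quarter buffer plus an (i+1)%3 counter) with a build-then-reshape decomposition: first build the flat list of 12 month strings, then cut it into quarters with slices.
import Mathlib
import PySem

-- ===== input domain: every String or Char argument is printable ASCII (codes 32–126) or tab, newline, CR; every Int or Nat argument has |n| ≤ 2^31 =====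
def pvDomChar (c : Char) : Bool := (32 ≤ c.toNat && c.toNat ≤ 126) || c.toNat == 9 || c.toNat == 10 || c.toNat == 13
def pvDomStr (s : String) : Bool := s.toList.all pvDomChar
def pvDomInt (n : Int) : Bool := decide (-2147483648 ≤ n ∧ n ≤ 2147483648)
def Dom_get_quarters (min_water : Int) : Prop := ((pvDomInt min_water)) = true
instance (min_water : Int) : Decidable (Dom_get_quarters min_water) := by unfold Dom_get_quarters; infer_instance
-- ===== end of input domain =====

-- B replaces A's interleaved accumulate-and-emit loop with a build-then-reshape decomposition (same cost; objective: simpler).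


def MONTHS : List String := ["01", "02", "03", "04", "05", "06", "07", "08",
  "09", "10", "11", "12"]

-- ===== PORT A =====
-- fold over enumerate(range(min_water, min_water+12)) with state (quarters, quarter);
-- MONTHS[mo-1] via pyGetD (Pre_ guarantees the index is in range, so the default is never used)
def get_quarters (min_water : Int) : List (List String) :=
  let st :=
    (PySem.List.enumerate (PySem.List.pyRange min_water (min_water + 12) 1)).foldl
      (fun (st : List (List String) × List String) (p : Int × Int) =>
        let (quarters, quarter) := st
        let (i, mo0) := p
        let mo := if mo0 > 12 then mo0 - 12 else mo0
        if PySem.Int.mod (i + 1) 3 ≠ 0 then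
          (quarters, quarter ++ [PySem.List.pyGetD MONTHS (mo - 1) ""])
        else
          (quarters ++ [quarter ++ [PySem.List.pyGetD MONTHS (mo - 1) ""]], []))
      ([], [])
  st.1

-- ===== PORT B =====
-- build the flat list of 12 month strings, then reshape by slicing
def get_quarters_alt (min_water : Int) : List (List String) :=
  let months :=
    (PySem.List.pyRange 0 12 1).foldl
      (fun (acc : List String) (i : Int) =>
        let mo0 := min_water + i
        let mo := if mo0 > 12 then mo0 - 12 else mo0
        acc ++ [PySem.List.pyGetD MONTHS (mo - 1) ""])
      []
  (PySem.List.pyRange 0 12 3).map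
    (fun j => PySem.List.slice months (some j) (some (j + 3)))

-- ===== PRECONDITION & SPEC =====
-- Pre_ excludes exactly the inputs on which Python's month-list lookup raises IndexError
def Pre_get_quarters (min_water : Int) : Prop := -11 ≤ min_water ∧ min_water ≤ 13
instance (min_water : Int) : Decidable (Pre_get_quarters min_water) := by unfold Pre_get_quarters; infer_instance
def pvWitness_get_quarters : Int := (1)
def Spec_get_quarters (min_water : Int) (out : List (List String)) : Prop := out = get_quarters_alt min_water
instance (min_water : Int) (out : List (List String)) : Decidable (Spec_get_quarters min_water out) := by unfold Spec_get_quarters; infer_instance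

-- ===== CLAIM (what is proved, stated in full; the proofs are below) =====
def Claim_equal_get_quarters : Prop := ∀ (min_water : Int), Dom_get_quarters min_water → Pre_get_quarters min_water → Spec_get_quarters min_water (get_quarters min_water)

-- ===== LEMMAS AND PROOFS =====

-- ===== VERDICT (by name: the statement is the Claim_ definition above) =====
theorem get_quarters_spec : Claim_equal_get_quarters := by
  intro m _ hp
  obtain ⟨h1, h2⟩ := hp
  unfold Spec_get_quarters
  interval_cases m <;> decide
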